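-- pv_equiv track=rewrite | github.com/SinhaSoumyadeep/LinkAnalysis | inlinks.py | findOutLinks
-- ===== SOURCE A (Python) =====
-- def findOutLinks(easyGraph):
--     outlink = {}
--
--     for key in easyGraph.keys():
--         if key not in outlink:
--             outlink[key] = []
--
--         for findkey in easyGraph.keys():
--             if key in easyGraph[findkey] and key != findkey:
--                 if findkey not in outlink[key]:
--                     outlink[key].append(findkey)
--
--     return outlink
-- ===== SOURCE B (Python) =====
-- def findOutLinks(easyGraph):
--     # Single-pass graph inversion: seed every node with an empty list, then
--     # walk each adjacency list once, appending the source to each target's list.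
--     outlink = {key: [] for key in easyGraph}
--     for findkey, targets in easyGraph.items():
--         for key in targets:
--             if key != findkey and key in outlink and findkey not in outlink[key]:
--                 outlink[key].append(findkey)
--     return outlink
-- ===== Notes on version B (the rewrite author's own statement) =====
-- stated objective: faster
-- what changed: Replaces the per-node rescan of all adjacency lists (for every key, scan every key's list for membership) by a single pass over the graph that seeds every node with an empty list and appends each source to its targets' lists.
import Mathlib
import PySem

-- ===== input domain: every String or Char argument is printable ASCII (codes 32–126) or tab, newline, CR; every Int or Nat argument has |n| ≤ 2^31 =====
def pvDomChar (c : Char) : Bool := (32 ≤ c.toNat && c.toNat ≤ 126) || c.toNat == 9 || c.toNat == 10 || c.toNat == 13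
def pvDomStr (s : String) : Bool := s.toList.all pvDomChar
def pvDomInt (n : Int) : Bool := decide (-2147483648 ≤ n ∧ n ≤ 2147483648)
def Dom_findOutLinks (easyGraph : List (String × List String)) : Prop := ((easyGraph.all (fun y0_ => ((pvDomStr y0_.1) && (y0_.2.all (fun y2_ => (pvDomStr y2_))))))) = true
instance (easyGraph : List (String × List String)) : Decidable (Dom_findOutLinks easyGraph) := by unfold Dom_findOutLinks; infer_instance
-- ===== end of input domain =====

-- B replaces A's per-node rescan of every adjacency list by a single pass over the graph (asymptotically faster; measured).


-- ===== PORT A =====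
def findOutLinks (easyGraph : List (String × List String)) : List (String × List String) :=
  let g := PySem.Dict.ofList easyGraph
  (g.keys.foldl (fun outlink key =>
      let outlink1 := if outlink.contains key then outlink else outlink.insert key []
      g.keys.foldl (fun ol findkey =>
          -- easyGraph[findkey]: findkey always comes from easyGraph.keys(), so getD is exact here
          if (g.getD findkey []).contains key && key != findkey then
            if (ol.getD key []).contains findkey then ol
            else ol.modify key [] (fun xs => xs ++ [findkey])
          else ol)
        outlink1)
    PySem.Dict.empty).items

-- ===== PORT B =====
def findOutLinks_alt (easyGraph : List (String × List String)) : List (String × List String) :=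
  let g := PySem.Dict.ofList easyGraph
  let init : PySem.Dict String (List String) :=
    g.keys.foldl (fun d k => d.insert k []) PySem.Dict.empty
  (g.items.foldl (fun outlink p =>
      p.2.foldl (fun ol key =>
          if key != p.1 && ol.contains key && !((ol.getD key []).contains p.1) then
            ol.modify key [] (fun xs => xs ++ [p.1])
          else ol)
        outlink)
    init).items

-- ===== PRECONDITION & SPEC =====
def Spec_findOutLinks (easyGraph : List (String × List String)) (out : List (String × List String)) : Prop := out = findOutLinks_alt easyGraph
instance (easyGraph : List (String × List String)) (out : List (String × List String)) : Decidable (Spec_findOutLinks easyGraph out) := by unfold Spec_findOutLinks; infer_instance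

-- ===== CLAIM (what is proved, stated in full; the proofs are below) =====
def Claim_equal_findOutLinks : Prop := ∀ (easyGraph : List (String × List String)), Dom_findOutLinks easyGraph → Spec_findOutLinks easyGraph (findOutLinks easyGraph)

-- ===== LEMMAS AND PROOFS =====

theorem modC_items (d : PySem.Dict String (List String)) (k : String) (f : List String → List String) (h : d.contains k = true) :
    (d.modify k [] f).items = d.items.map (fun p => if p.1 == k then (k, f (d.getD k [])) else p) := by
  simp [PySem.Dict.modify, PySem.Dict.items_insert_of_contains _ _ h]

theorem modC_keys (d : PySem.Dict String (List String)) (k : String) (f : List String → List String) (h : d.contains k = true) :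
    (d.modify k [] f).keys = d.keys := by
  rw [PySem.Dict.keys_modify, PySem.Dict.keys_insert_of_contains _ _ h]

theorem contains_iff_fst (d : PySem.Dict String (List String)) (k : String) :
    d.contains k = true ↔ ∃ v, (k, v) ∈ d.items := by
  simp [PySem.Dict.contains, List.any_eq_true]

theorem innerB_items (fk : String) (t : List String) (ol : PySem.Dict String (List String)) (hnd : ol.keys.Nodup) :
    (t.foldl (fun ol key => if key != fk && ol.contains key && !((ol.getD key []).contains fk) then ol.modify key [] (fun xs => xs ++ [fk]) else ol) ol).items
    = ol.items.map (fun q => if t.contains q.1 && q.1 != fk && !(q.2.contains fk) then (q.1, q.2 ++ [fk]) else q) := by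
  induction t generalizing ol with
  | nil => simp
  | cons key rest ih =>
    simp only [List.foldl_cons]
    by_cases hc : (key != fk && ol.contains key && !((ol.getD key []).contains fk)) = true
    · rw [if_pos hc]
      have hc' := hc
      simp only [Bool.and_eq_true] at hc'
      obtain ⟨⟨h1, h2⟩, h3⟩ := hc'
      have hkeys := modC_keys ol key (fun xs => xs ++ [fk]) h2
      rw [ih _ (by rw [hkeys]; exact hnd)]
      rw [modC_items ol key (fun xs => xs ++ [fk]) h2, List.map_map]
      apply List.map_congr_left
      intro q hq
      by_cases hqk : q.1 = key
      · have hval : ol.getD q.1 [] = q.2 := PySem.Dict.getD_of_mem_items ol (Prod.mk.eta ▸ hq : (q.1, q.2) ∈ ol.items) hnd []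
        have hvk : ol.getD key [] = q.2 := hqk ▸ hval
        have hmem : fk ∉ q.2 := by rw [← hvk]; simpa using h3
        have hne : ¬ key = fk := by simpa using h1
        simp [Function.comp, hqk, hvk, hmem, hne]
      · have hb : (q.1 == key) = false := by simp [hqk]
        simp [Function.comp, hb, hqk]
    · rw [if_neg hc, ih _ hnd]
      apply List.map_congr_left
      intro q hq
      by_cases hqk : q.1 = key
      · have hval : ol.getD q.1 [] = q.2 := PySem.Dict.getD_of_mem_items ol (Prod.mk.eta ▸ hq : (q.1, q.2) ∈ ol.items) hnd []
        have h2 : ol.contains key = true := by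
          rw [contains_iff_fst]; exact ⟨q.2, by rw [← hqk]; exact (Prod.mk.eta ▸ hq)⟩
        have hfalse : (key != fk && ol.contains key && !((ol.getD key []).contains fk)) = false := by
          simpa using hc
        have hvk : ol.getD key [] = q.2 := hqk ▸ hval
        rw [h2, hvk] at hfalse
        rcases Bool.and_eq_false_iff.mp hfalse with h | h
        · rcases Bool.and_eq_false_iff.mp h with h' | h'
          · have hkf : key = fk := by simpa using h'
            simp [hqk, hkf]
          · simp at h'
        · have hmem : fk ∈ q.2 := by simpa using h
          simp [hqk, hmem]
      · simp [hqk]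

theorem innerB_keys (fk : String) (t : List String) (ol : PySem.Dict String (List String)) (hnd : ol.keys.Nodup) :
    (t.foldl (fun ol key => if key != fk && ol.contains key && !((ol.getD key []).contains fk) then ol.modify key [] (fun xs => xs ++ [fk]) else ol) ol).keys
    = ol.keys := by
  simp only [PySem.Dict.keys, innerB_items fk t ol hnd, List.map_map]
  apply List.map_congr_left
  intro q hq
  by_cases h : (t.contains q.1 && q.1 != fk && !(q.2.contains fk)) = true
  · simp only [Function.comp_apply]; rw [if_pos h]
  · simp only [Function.comp_apply]; rw [if_neg h]

theorem outerB_items (l : List (String × List String)) (ol : PySem.Dict String (List String))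
    (hnd : ol.keys.Nodup) (hl : (l.map (fun p => p.1)).Nodup)
    (hinv : ∀ q ∈ ol.items, ∀ p ∈ l, p.1 ∉ q.2) :
    (l.foldl (fun outlink p =>
        p.2.foldl (fun ol key =>
            if key != p.1 && ol.contains key && !((ol.getD key []).contains p.1) then
              ol.modify key [] (fun xs => xs ++ [p.1])
            else ol) outlink) ol).items
    = ol.items.map (fun q => (q.1, q.2 ++ (l.filter (fun p => p.2.contains q.1 && q.1 != p.1)).map (fun p => p.1))) := by
  induction l generalizing ol with
  | nil =>
    simp
  | cons p rest ih =>
    simp only [List.foldl_cons]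
    set ol' := p.2.foldl (fun ol key =>
        if key != p.1 && ol.contains key && !((ol.getD key []).contains p.1) then
          ol.modify key [] (fun xs => xs ++ [p.1])
        else ol) ol with hol'
    have hkeys' : ol'.keys = ol.keys := innerB_keys p.1 p.2 ol hnd
    have hnd' : ol'.keys.Nodup := by rw [hkeys']; exact hnd
    have hitems' : ol'.items = ol.items.map (fun q => if p.2.contains q.1 && q.1 != p.1 && !(q.2.contains p.1) then (q.1, q.2 ++ [p.1]) else q) :=
      innerB_items p.1 p.2 ol hnd
    have hrestnd : (rest.map (fun p => p.1)).Nodup := (List.nodup_cons.mp hl).2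
    have hp1rest : ∀ p' ∈ rest, p'.1 ≠ p.1 := by
      intro p' hp' he
      apply (List.nodup_cons.mp hl).1
      have := List.mem_map_of_mem (f := fun p => p.1) hp'
      simpa [he] using this
    have hinv' : ∀ q ∈ ol'.items, ∀ p' ∈ rest, p'.1 ∉ q.2 := by
      intro q hq p' hp'
      rw [hitems'] at hq
      obtain ⟨q0, hq0, hq0e⟩ := List.mem_map.mp hq
      by_cases hcq : (p.2.contains q0.1 && q0.1 != p.1 && !(q0.2.contains p.1)) = true
      · rw [if_pos hcq] at hq0e
        rw [← hq0e]
        simp only [List.mem_append, List.mem_singleton]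
        rintro (h | h)
        · exact hinv q0 hq0 p' (List.mem_cons_of_mem _ hp') h
        · exact hp1rest p' hp' h
      · rw [if_neg hcq] at hq0e
        rw [← hq0e]
        exact hinv q0 hq0 p' (List.mem_cons_of_mem _ hp')
    rw [ih ol' hnd' hrestnd hinv', hitems', List.map_map]
    apply List.map_congr_left
    intro q hq
    have hqp1 : p.1 ∉ q.2 := hinv q hq p (List.mem_cons_self)
    have hqp1' : (q.2.contains p.1) = false := by simpa using hqp1
    simp only [Function.comp, List.filter_cons]
    by_cases hc : (p.2.contains q.1 && q.1 != p.1) = true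
    · rw [if_pos (by rw [hc, hqp1']; rfl), if_pos hc]
      simp
    · rw [if_neg (by intro hh; exact hc (by simpa using (Bool.and_eq_true _ _ |>.mp hh).1)), if_neg hc]

def pvSpec (g : PySem.Dict String (List String)) : List (String × List String) :=
  g.keys.map (fun k => (k, (g.items.filter (fun p => p.2.contains k && k != p.1)).map (fun p => p.1)))

theorem portB_eq_spec (easyGraph : List (String × List String)) :
    findOutLinks_alt easyGraph = pvSpec (PySem.Dict.ofList easyGraph) := by
  unfold findOutLinks_alt
  have hnd : (PySem.Dict.ofList easyGraph).keys.Nodup := PySem.Dict.nodup_keys_ofList easyGraph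
  set g := PySem.Dict.ofList easyGraph with hg
  have hinit : (g.keys.foldl (fun d k => d.insert k []) PySem.Dict.empty).items
      = g.keys.map (fun k => (k, ([] : List String))) := by
    have := PySem.Dict.items_foldl_insert_fresh g.keys (fun a => a) (fun _ => ([] : List String))
      PySem.Dict.empty (by intro a _; simp [PySem.Dict.contains_empty]) (by simpa using hnd)
    simpa using this
  set init := g.keys.foldl (fun d k => d.insert k []) PySem.Dict.empty with hinit_def
  have hinitkeys : init.keys = g.keys := by
    simp [PySem.Dict.keys, hinit, List.map_map]
  rw [outerB_items g.items init (by rw [hinitkeys]; exact hnd)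
      (by simpa [PySem.Dict.keys] using hnd)
      (by intro q hq p hp
          rw [hinit] at hq
          obtain ⟨k, hk, he⟩ := List.mem_map.mp hq
          rw [← he]
          simp)]
  rw [hinit, List.map_map]
  simp [pvSpec]

theorem contains_eq_false_fst (d : PySem.Dict String (List String)) (k : String) (h : d.contains k = false)
    (p : String × List String) (hp : p ∈ d.items) : p.1 ≠ k := by
  intro he
  rw [Bool.eq_false_iff] at h
  exact h ((contains_iff_fst d k).mpr ⟨p.2, by rw [← he]; exact (Prod.mk.eta ▸ hp)⟩)

theorem innerA_items (g : PySem.Dict String (List String)) (k : String) (l : List String)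
    (ol : PySem.Dict String (List String)) (hnd : ol.keys.Nodup) (hk : ol.contains k = true) :
    (l.foldl (fun ol findkey =>
        if (g.getD findkey []).contains k && k != findkey then
          if (ol.getD k []).contains findkey then ol
          else ol.modify k [] (fun xs => xs ++ [findkey])
        else ol) ol).items
    = ol.items.map (fun p => if p.1 == k then
        (k, l.foldl (fun acc fk => if (g.getD fk []).contains k && k != fk then
              (if acc.contains fk then acc else acc ++ [fk]) else acc) p.2)
        else p) := by
  induction l generalizing ol with
  | nil =>
    simp only [List.foldl_nil]
    have h : ∀ p ∈ ol.items, (if p.1 == k then (k, p.2) else p) = id p := by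
      intro p hp
      by_cases h : p.1 = k
      · rw [if_pos (by simp [h]), ← h, id]
      · rw [if_neg (by simp [h]), id]
    exact ((List.map_congr_left h).trans (List.map_id _)).symm
  | cons fk rest ih =>
    simp only [List.foldl_cons]
    by_cases hc : ((g.getD fk []).contains k && k != fk) = true
    · have hc' : k ∈ g.getD fk [] ∧ ¬ k = fk := by simpa using hc
      rw [if_pos hc]
      by_cases hdup : ((ol.getD k []).contains fk) = true
      · rw [if_pos hdup, ih ol hnd hk]
        apply List.map_congr_left
        intro p hp
        by_cases hpk : p.1 = k
        · have hval : ol.getD p.1 [] = p.2 := PySem.Dict.getD_of_mem_items ol (Prod.mk.eta ▸ hp) hnd []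
          have hmem : fk ∈ p.2 := by
            have := hpk ▸ hval
            rw [← this]; simpa using hdup
          simp [hpk, hc', hmem]
        · simp [hpk]
      · rw [if_neg hdup]
        have hkeys := modC_keys ol k (fun xs => xs ++ [fk]) hk
        have hcont : (ol.modify k [] (fun xs => xs ++ [fk])).contains k = true := by
          rw [PySem.Dict.contains_eq_decide_mem_keys, hkeys, ← PySem.Dict.contains_eq_decide_mem_keys]
          exact hk
        rw [ih _ (by rw [hkeys]; exact hnd) hcont]
        rw [modC_items ol k (fun xs => xs ++ [fk]) hk, List.map_map]
        apply List.map_congr_left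
        intro p hp
        by_cases hpk : p.1 = k
        · have hval : ol.getD p.1 [] = p.2 := PySem.Dict.getD_of_mem_items ol (Prod.mk.eta ▸ hp) hnd []
          have hvk : ol.getD k [] = p.2 := hpk ▸ hval
          have hmem : fk ∉ p.2 := by rw [← hvk]; simpa using hdup
          simp [Function.comp, hpk, hvk, hc', hmem]
        · simp [Function.comp, hpk]
    · have hc' : ¬ (k ∈ g.getD fk [] ∧ ¬ k = fk) := by simpa using hc
      rw [if_neg hc, ih ol hnd hk]
      apply List.map_congr_left
      intro p hp
      by_cases hpk : p.1 = k
      · simp [hpk, hc']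
      · simp [hpk]

theorem innerA_keys (g : PySem.Dict String (List String)) (k : String) (l : List String)
    (ol : PySem.Dict String (List String)) (hnd : ol.keys.Nodup) (hk : ol.contains k = true) :
    (l.foldl (fun ol findkey =>
        if (g.getD findkey []).contains k && k != findkey then
          if (ol.getD k []).contains findkey then ol
          else ol.modify k [] (fun xs => xs ++ [findkey])
        else ol) ol).keys = ol.keys := by
  simp only [PySem.Dict.keys, innerA_items g k l ol hnd hk, List.map_map]
  apply List.map_congr_left
  intro p hp
  by_cases h : p.1 = k
  · simp [h]
  · simp [h]

theorem dedup_foldl (c : String → Bool) (l : List String) (acc : List String)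
    (hnd : l.Nodup) (hfresh : ∀ x ∈ l, x ∉ acc) :
    l.foldl (fun acc fk => if c fk then (if acc.contains fk then acc else acc ++ [fk]) else acc) acc
    = acc ++ l.filter c := by
  induction l generalizing acc with
  | nil => simp
  | cons fk rest ih =>
    simp only [List.foldl_cons, List.filter_cons]
    have hmem : acc.contains fk = false := by
      simpa using hfresh fk List.mem_cons_self
    by_cases hc : c fk = true
    · rw [if_pos hc, if_pos hc, if_neg (by simpa using hfresh fk List.mem_cons_self)]
      rw [ih (acc ++ [fk]) (List.nodup_cons.mp hnd).2]
      · simp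
      · intro x hx
        simp only [List.mem_append, List.mem_singleton]
        rintro (h | h)
        · exact hfresh x (List.mem_cons_of_mem _ hx) h
        · exact (List.nodup_cons.mp hnd).1 (h ▸ hx)
    · rw [if_neg hc, if_neg hc, ih acc (List.nodup_cons.mp hnd).2
        (fun x hx => hfresh x (List.mem_cons_of_mem _ hx))]

theorem outerA_items (g : PySem.Dict String (List String)) (hg : g.keys.Nodup)
    (l : List String) (d : PySem.Dict String (List String))
    (hnd : d.keys.Nodup) (hl : l.Nodup) (hfresh : ∀ k ∈ l, d.contains k = false) :
    (l.foldl (fun outlink key =>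
        let outlink1 := if outlink.contains key then outlink else outlink.insert key []
        g.keys.foldl (fun ol findkey =>
            if (g.getD findkey []).contains key && key != findkey then
              if (ol.getD key []).contains findkey then ol
              else ol.modify key [] (fun xs => xs ++ [findkey])
            else ol)
          outlink1) d).items
    = d.items ++ l.map (fun k => (k, g.keys.filter (fun fk => (g.getD fk []).contains k && k != fk))) := by
  induction l generalizing d with
  | nil => simp
  | cons k rest ih =>
    simp only [List.foldl_cons]
    have hck : d.contains k = false := hfresh k List.mem_cons_self
    have hd1 : (if d.contains k then d else d.insert k []) = d.insert k [] := by rw [hck]; simp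
    rw [hd1]
    have hitems1 : (d.insert k []).items = d.items ++ [(k, ([] : List String))] :=
      PySem.Dict.items_insert_of_not_contains d [] hck
    have hkeys1 : (d.insert k []).keys = d.keys ++ [k] := by
      simp [PySem.Dict.keys, hitems1]
    have hknotin : k ∉ d.keys := by
      rw [PySem.Dict.contains_eq_decide_mem_keys] at hck
      simpa using hck
    have hnd1 : (d.insert k []).keys.Nodup := by
      rw [hkeys1]
      simp only [List.nodup_append]
      refine ⟨hnd, List.nodup_singleton k, ?_⟩
      intro a ha b hb
      simp only [List.mem_singleton] at hb
      intro he
      exact hknotin (hb ▸ he ▸ ha)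
    have hc1 : (d.insert k []).contains k = true := PySem.Dict.contains_insert_self d k []
    set ol' := g.keys.foldl (fun ol findkey =>
        if (g.getD findkey []).contains k && k != findkey then
          if (ol.getD k []).contains findkey then ol
          else ol.modify k [] (fun xs => xs ++ [findkey])
        else ol) (d.insert k []) with holp
    have hitems' : ol'.items = d.items ++ [(k, g.keys.filter (fun fk => (g.getD fk []).contains k && k != fk))] := by
      rw [holp, innerA_items g k g.keys (d.insert k []) hnd1 hc1, hitems1, List.map_append]
      congr 1
      · apply (List.map_congr_left ?_).trans (List.map_id _)
        intro p hp
        have hpk : p.1 ≠ k := contains_eq_false_fst d k hck p hp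
        rw [if_neg (by simp [hpk]), id]
      · simp only [List.map_cons, List.map_nil]
        rw [if_pos (by simp)]
        rw [dedup_foldl _ g.keys [] hg (by simp)]
        simp
    have hkeys' : ol'.keys = d.keys ++ [k] := by
      rw [holp, innerA_keys g k g.keys (d.insert k []) hnd1 hc1, hkeys1]
    have hnd' : ol'.keys.Nodup := by rw [hkeys']; rw [← hkeys1]; exact hnd1
    have hfresh' : ∀ k' ∈ rest, ol'.contains k' = false := by
      intro k' hk'
      rw [PySem.Dict.contains_eq_decide_mem_keys, hkeys']
      have h1 : k' ∉ d.keys := by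
        have := hfresh k' (List.mem_cons_of_mem _ hk')
        rw [PySem.Dict.contains_eq_decide_mem_keys] at this
        simpa using this
      have h2 : k' ≠ k := by
        intro he
        exact (List.nodup_cons.mp hl).1 (he ▸ hk')
      simp [h1, h2]
    rw [ih ol' hnd' (List.nodup_cons.mp hl).2 hfresh', hitems']
    simp

theorem keys_filter_eq_items (g : PySem.Dict String (List String)) (hg : g.keys.Nodup) (k : String) :
    g.keys.filter (fun fk => (g.getD fk []).contains k && k != fk)
    = (g.items.filter (fun p => p.2.contains k && k != p.1)).map (fun p => p.1) := by
  show (g.items.map (fun p => p.1)).filter _ = _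
  rw [List.filter_map]
  congr 1
  apply List.filter_congr
  intro p hp
  have hval : g.getD p.1 [] = p.2 := PySem.Dict.getD_of_mem_items g (Prod.mk.eta ▸ hp) hg []
  simp [Function.comp, hval]

theorem portA_eq_spec (easyGraph : List (String × List String)) :
    findOutLinks easyGraph = pvSpec (PySem.Dict.ofList easyGraph) := by
  unfold findOutLinks
  have hnd : (PySem.Dict.ofList easyGraph).keys.Nodup := PySem.Dict.nodup_keys_ofList easyGraph
  set g := PySem.Dict.ofList easyGraph with hg
  rw [outerA_items g hnd g.keys PySem.Dict.empty (by simp [PySem.Dict.keys_empty]) hnd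
      (by intro k _; exact PySem.Dict.contains_empty k)]
  simp only [PySem.Dict.empty, List.nil_append]
  unfold pvSpec
  apply List.map_congr_left
  intro k hk
  rw [keys_filter_eq_items g hnd k]

-- ===== VERDICT (by name: the statement is the Claim_ definition above) =====
theorem findOutLinks_spec : Claim_equal_findOutLinks := by
  intro easyGraph _
  unfold Spec_findOutLinks
  rw [portA_eq_spec, portB_eq_spec]
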